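-- pv_equiv track=rewrite | github.com/opencollector/jsonapi-serde | src/jsonapi_serde/serde/utils/formatting.py | english_enumerate
-- ===== SOURCE A (Python) =====
-- import typing
--
-- def english_enumerate(items: typing.Iterable[str], conj: str = ", and ") -> str:
--     buf = []
--
--     i = iter(items)
--     try:
--         x = next(i)
--     except StopIteration:
--         return ""
--     buf.append(x)
--
--     lx: typing.Optional[str] = None
--
--     for x in i:
--         if lx is not None:
--             buf.append(", ")
--             buf.append(lx)
--         lx = x
--     if lx is not None:
--         buf.append(conj)
--         buf.append(lx)
--     return "".join(buf)
-- ===== SOURCE B (Python) =====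
-- def english_enumerate(items, conj=", and "):
--     items = list(items)
--     if not items:
--         return ""
--     if len(items) == 1:
--         return items[0]
--     return ", ".join(items[:-1]) + conj + items[-1]
-- ===== Notes on version B (the rewrite author's own statement) =====
-- stated objective: simpler
-- what changed: Replaces A's single-pass lookahead loop (delaying separators via a previous-element variable lx and a piece buffer) with a direct decomposition: join all-but-last with ', ' and append conj plus the last element via slicing.
import Mathlib
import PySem

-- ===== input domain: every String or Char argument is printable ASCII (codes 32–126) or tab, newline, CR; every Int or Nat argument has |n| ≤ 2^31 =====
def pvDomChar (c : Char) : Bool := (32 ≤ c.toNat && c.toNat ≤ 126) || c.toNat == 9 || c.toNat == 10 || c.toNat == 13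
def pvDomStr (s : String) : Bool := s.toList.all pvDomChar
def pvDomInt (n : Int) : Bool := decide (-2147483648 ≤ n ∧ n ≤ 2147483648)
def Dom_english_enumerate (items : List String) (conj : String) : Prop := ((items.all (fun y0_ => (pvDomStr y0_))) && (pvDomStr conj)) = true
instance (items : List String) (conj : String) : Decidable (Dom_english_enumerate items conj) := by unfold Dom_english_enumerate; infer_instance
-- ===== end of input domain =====

-- B replaces A's single-pass lookahead loop (delaying separators via a previous-element
-- variable) with a plain decomposition: join all-but-last with ", ", append conj + last.


-- ===== PORT A =====
-- A's 'for x in i' loop over the tail, carrying (buf, lx) exactly as the Python does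
def englishEnumLoop (buf : List String) (lx : Option String) : List String → List String × Option String
  | [] => (buf, lx)
  | x :: xs =>
      englishEnumLoop (match lx with | some l => buf ++ [", ", l] | none => buf) (some x) xs

def english_enumerate (items : List String) (conj : String) : String :=
  match items with
  | [] => ""                                   -- StopIteration on first next(): return ""
  | x :: rest =>
      let st := englishEnumLoop [x] none rest  -- buf = [x]; lx = None; the for-loop
      let buf := match st.2 with               -- trailing 'if lx is not None'
        | some l => st.1 ++ [conj, l]
        | none => st.1
      PySem.Str.join "" buf                    -- "".join(buf)

-- ===== PORT B =====
def english_enumerate_alt (items : List String) (conj : String) : String :=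
  match items with
  | [] => ""
  | [x] => x
  | x :: y :: rest =>
      let its := x :: y :: rest
      PySem.Str.join ", " (PySem.List.slice its none (some (-1)))   -- ", ".join(items[:-1])
        ++ conj ++ its.getLast (List.cons_ne_nil x (y :: rest))     -- + conj + items[-1]

-- ===== PRECONDITION & SPEC =====
def Spec_english_enumerate (items : List String) (conj : String) (out : String) : Prop := out = english_enumerate_alt items conj
instance (items : List String) (conj : String) (out : String) : Decidable (Spec_english_enumerate items conj out) := by unfold Spec_english_enumerate; infer_instance

-- ===== CLAIM (what is proved, stated in full; the proofs are below) =====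
def Claim_equal_english_enumerate : Prop := ∀ (items : List String) (conj : String), Dom_english_enumerate items conj → Spec_english_enumerate items conj (english_enumerate items conj)

-- ===== LEMMAS AND PROOFS =====

-- A's loop, once lx is set, emits ", "-separated copies of all but the last element
-- and leaves the last element pending in lx.
theorem englishEnumLoop_some (ys : List String) : ∀ (buf : List String) (l : String),
    englishEnumLoop buf (some l) ys =
      (buf ++ (l :: ys).dropLast.flatMap (fun z => [", ", z]),
       some ((l :: ys).getLast (List.cons_ne_nil l ys))) := by
  induction ys with
  | nil => intro buf l; simp [englishEnumLoop]
  | cons y ys ih =>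
      intro buf l
      simp only [englishEnumLoop, ih]
      simp [List.getLast_cons, List.append_assoc]

theorem slice_neg_one_eq_dropLast (xs : List String) :
    PySem.List.slice xs none (some (-1)) = xs.dropLast := by
  have h := PySem.List.slice_to_neg_natCast (xs := xs) (k := 1) one_pos
  simpa [List.dropLast_eq_take] using h

-- the core rearrangement, on the Chars side
theorem join_flat_eq (comma conj L : List Char) (init : List (List Char)) :
    ∀ x : List Char,
    PySem.Chars.join [] ([x] ++ init.flatMap (fun z => [comma, z]) ++ [conj, L]) =
      PySem.Chars.join comma (x :: init) ++ conj ++ L := by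
  induction init with
  | nil =>
      intro x
      simp [PySem.Chars.join_cons_cons, PySem.Chars.join_singleton]
  | cons z init ih =>
      intro x
      have h := ih z
      simp only [List.flatMap_cons, List.cons_append, List.nil_append, List.append_assoc] at h ⊢
      rw [PySem.Chars.join_cons_cons, PySem.Chars.join_cons_cons, h,
        PySem.Chars.join_cons_cons]
      simp [List.append_assoc]

theorem eq_lemma (x y : String) (ys : List String) (conj : String) :
    PySem.Str.join ""
        ([x] ++ (y :: ys).dropLast.flatMap (fun z => [", ", z]) ++
          [conj, (y :: ys).getLast (List.cons_ne_nil y ys)]) =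
      PySem.Str.join ", " ((x :: y :: ys).dropLast) ++ conj ++
        (x :: y :: ys).getLast (List.cons_ne_nil x (y :: ys)) := by
  apply String.toList_inj.mp
  have h := join_flat_eq (", ".toList) conj.toList
      ((y :: ys).getLast (List.cons_ne_nil y ys)).toList
      ((y :: ys).dropLast.map String.toList) x.toList
  simp only [PySem.Str.toList_join, String.toList_append, List.map_append, List.map_cons,
    List.map_flatMap] at *
  rw [show ("" : String).toList = [] from rfl]
  simp only [List.flatMap_map] at h
  convert h using 3

-- ===== VERDICT =====
theorem english_enumerate_spec : Claim_equal_english_enumerate := by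
  unfold Claim_equal_english_enumerate
  intro items conj _
  unfold Spec_english_enumerate
  match items with
  | [] => rfl
  | [x] =>
      show PySem.Str.join "" [x] = x
      apply String.toList_inj.mp
      simp [PySem.Chars.join_singleton]
  | x :: y :: ys =>
      show (let st := englishEnumLoop [x] (some y) ys
            PySem.Str.join "" (match st.2 with
              | some l => st.1 ++ [conj, l]
              | none => st.1)) = _
      rw [englishEnumLoop_some]
      simp only []
      rw [eq_lemma]
      simp [english_enumerate_alt, slice_neg_one_eq_dropLast]
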